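-- pv_equiv track=rewrite | github.com/muzamilui/mk-quantum-backend | main.py | _compute_max_pain
-- ===== SOURCE A (Python) =====
-- def _compute_max_pain(strikes, ce_oi, pe_oi) -> float:
--     if not strikes:
--         return 0
--     min_loss = float("inf")
--     max_pain_strike = strikes[0]
--     for target in strikes:
--         loss = 0
--         for strike, oi in ce_oi.items():
--             if target > strike:
--                 loss += (target - strike) * oi
--         for strike, oi in pe_oi.items():
--             if target < strike:
--                 loss += (strike - target) * oi
--         if loss < min_loss:
--             min_loss = loss
--             max_pain_strike = target
--     return max_pain_strike
-- ===== SOURCE B (Python) =====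
-- def _compute_max_pain(strikes, ce_oi, pe_oi) -> float:
--     if not strikes:
--         return 0
--     ce = sorted(ce_oi.items(), key=lambda kv: kv[0])
--     pe = sorted(pe_oi.items(), key=lambda kv: kv[0])
--     pe_c = sum(oi for _, oi in pe)
--     pe_t = sum(s * oi for s, oi in pe)
--     targets = sorted(set(strikes))
--     losses = {}
--     i = j = 0
--     c1 = t1 = 0  # running sums of oi and s*oi over ce strikes < target
--     c2 = t2 = 0  # running sums of oi and s*oi over pe strikes <= target
--     for target in targets:
--         while i < len(ce) and ce[i][0] < target:
--             s, oi = ce[i]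
--             c1 += oi
--             t1 += s * oi
--             i += 1
--         while j < len(pe) and pe[j][0] <= target:
--             s, oi = pe[j]
--             c2 += oi
--             t2 += s * oi
--             j += 1
--         losses[target] = (target * c1 - t1) + ((pe_t - t2) - target * (pe_c - c2))
--     best = strikes[0]
--     best_loss = losses[best]
--     for s in strikes:
--         if losses[s] < best_loss:
--             best_loss = losses[s]
--             best = s
--     return best
-- ===== Notes on version B (the rewrite author's own statement) =====
-- stated objective: faster
-- what changed: Instead of rescanning all CE/PE open-interest entries for every candidate strike (O(n*m)), B sorts the OI lists and the distinct strikes once and computes every strike's loss in a single merged sweep with running prefix sums of oi and strike*oi, then takes the argmin over the original strike order from the precomputed loss table.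
import Mathlib
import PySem

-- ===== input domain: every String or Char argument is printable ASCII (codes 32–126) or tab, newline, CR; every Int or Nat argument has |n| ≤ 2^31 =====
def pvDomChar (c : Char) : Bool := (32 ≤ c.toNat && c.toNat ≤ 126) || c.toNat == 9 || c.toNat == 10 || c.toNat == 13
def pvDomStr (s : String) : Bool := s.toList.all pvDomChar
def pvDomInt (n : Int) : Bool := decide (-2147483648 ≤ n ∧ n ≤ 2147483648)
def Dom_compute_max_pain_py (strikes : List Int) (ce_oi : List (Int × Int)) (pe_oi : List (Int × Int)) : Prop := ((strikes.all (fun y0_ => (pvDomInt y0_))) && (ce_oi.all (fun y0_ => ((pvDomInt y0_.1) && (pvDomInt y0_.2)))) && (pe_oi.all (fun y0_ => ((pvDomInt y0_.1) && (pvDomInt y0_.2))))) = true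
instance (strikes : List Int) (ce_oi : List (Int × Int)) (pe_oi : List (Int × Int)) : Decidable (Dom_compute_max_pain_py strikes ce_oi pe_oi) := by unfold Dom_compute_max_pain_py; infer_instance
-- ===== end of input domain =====

-- B replaces A's per-strike rescans of the OI dicts (O(n*m)) by one sort + one merged
-- prefix-sum sweep over the distinct strikes (O((n+m) log(n+m))); return value proved equal.

-- ===== PORT A =====
-- A's two inner loops over the dict items, accumulating loss for one target.
def pvLossA (target : Int) (ce_oi : List (Int × Int)) (pe_oi : List (Int × Int)) : Int :=
  let l1 := ce_oi.foldl (fun loss p => if target > p.1 then loss + (target - p.1) * p.2 else loss) 0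
  pe_oi.foldl (fun loss p => if target < p.1 then loss + (p.1 - target) * p.2 else loss) l1

def compute_max_pain_py (strikes : List Int) (ce_oi : List (Int × Int)) (pe_oi : List (Int × Int)) : Int :=
  match strikes with
  | [] => 0
  | s0 :: _ =>
    -- min_loss = float("inf") modelled as none; loss < inf is always true
    (strikes.foldl (fun st target =>
        let loss := pvLossA target ce_oi pe_oi
        match st.1 with
        | none => (some loss, target)
        | some m => if loss < m then (some loss, target) else st)
      ((none : Option Int), s0)).2

-- ===== PORT B =====
-- Source B's inner `while i < len(ce) and ce[i][0] < target` pointer loop, transcribed on the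
-- remaining suffix of the list: consumes leading pairs with strike < target into the sums.
def pvAdvLt : List (Int × Int) → Int → Int → Int → List (Int × Int) × Int × Int
  | [], _, c, t => ([], c, t)
  | (s, oi) :: rest, tgt, c, t =>
    if s < tgt then pvAdvLt rest tgt (c + oi) (t + s * oi) else ((s, oi) :: rest, c, t)

-- same for the `pe[j][0] <= target` pointer loop
def pvAdvLe : List (Int × Int) → Int → Int → Int → List (Int × Int) × Int × Int
  | [], _, c, t => ([], c, t)
  | (s, oi) :: rest, tgt, c, t =>
    if s ≤ tgt then pvAdvLe rest tgt (c + oi) (t + s * oi) else ((s, oi) :: rest, c, t)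

-- body of Source B's `for target in targets` sweep; state = ((ce rest, c1, t1), (pe rest, c2, t2), losses)
def pvStepB (peC peT : Int)
    (st : (List (Int × Int) × Int × Int) × (List (Int × Int) × Int × Int) × PySem.Dict Int Int)
    (target : Int) :
    (List (Int × Int) × Int × Int) × (List (Int × Int) × Int × Int) × PySem.Dict Int Int :=
  match pvAdvLt st.1.1 target st.1.2.1 st.1.2.2, pvAdvLe st.2.1.1 target st.2.1.2.1 st.2.1.2.2 with
  | (ceR, c1, t1), (peR, c2, t2) =>
    ((ceR, c1, t1), (peR, c2, t2),
      (st.2.2).insert target ((target * c1 - t1) + ((peT - t2) - target * (peC - c2))))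

def compute_max_pain_py_alt (strikes : List Int) (ce_oi : List (Int × Int)) (pe_oi : List (Int × Int)) : Int :=
  match strikes with
  | [] => 0
  | s0 :: _ =>
    let ce := PySem.List.sorted ce_oi (fun kv => kv.1) false
    let pe := PySem.List.sorted pe_oi (fun kv => kv.1) false
    let peC := (pe.map (fun p => p.2)).sum
    let peT := (pe.map (fun p => p.1 * p.2)).sum
    let targets := PySem.List.sorted (PySem.Set.ofList strikes) (fun x => x) false
    let losses := (targets.foldl (pvStepB peC peT)
        ((ce, 0, 0), (pe, 0, 0), (PySem.Dict.empty : PySem.Dict Int Int))).2.2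
    -- losses[s]: every strike is a key of losses, so the lookup never raises
    (strikes.foldl (fun st s =>
        if losses.getD s 0 < st.1 then (losses.getD s 0, s) else st)
      (losses.getD s0 0, s0)).2

-- ===== PRECONDITION & SPEC =====
def Spec_compute_max_pain_py (strikes : List Int) (ce_oi : List (Int × Int)) (pe_oi : List (Int × Int)) (out : Int) : Prop := out = compute_max_pain_py_alt strikes ce_oi pe_oi
instance (strikes : List Int) (ce_oi : List (Int × Int)) (pe_oi : List (Int × Int)) (out : Int) : Decidable (Spec_compute_max_pain_py strikes ce_oi pe_oi out) := by unfold Spec_compute_max_pain_py; infer_instance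

-- ===== CLAIM (what is proved, stated in full; the proofs are below) =====
def Claim_equal_compute_max_pain_py : Prop := ∀ (strikes : List Int) (ce_oi : List (Int × Int)) (pe_oi : List (Int × Int)), Dom_compute_max_pain_py strikes ce_oi pe_oi → Spec_compute_max_pain_py strikes ce_oi pe_oi (compute_max_pain_py strikes ce_oi pe_oi)

-- ===== LEMMAS AND PROOFS =====

-- abbreviations for the two running sums
def pvSumOI (l : List (Int × Int)) : Int := (l.map (fun p => p.2)).sum
def pvSumSOI (l : List (Int × Int)) : Int := (l.map (fun p => p.1 * p.2)).sum

def pvLtB (t : Int) : Int × Int → Bool := fun p => decide (p.1 < t)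
def pvLeB (t : Int) : Int × Int → Bool := fun p => decide (p.1 ≤ t)

theorem pvAdvLt_eq (l : List (Int × Int)) (tgt c t : Int) :
    pvAdvLt l tgt c t =
      (l.dropWhile (pvLtB tgt), c + pvSumOI (l.takeWhile (pvLtB tgt)),
        t + pvSumSOI (l.takeWhile (pvLtB tgt))) := by
  induction l generalizing c t with
  | nil => simp [pvAdvLt, pvSumOI, pvSumSOI]
  | cons hd tl ih =>
    obtain ⟨s, oi⟩ := hd
    by_cases h : s < tgt
    · simp only [pvAdvLt, if_pos h, ih, List.takeWhile_cons, List.dropWhile_cons, pvLtB,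
        decide_eq_true_eq, h, if_true, decide_true, pvSumOI, pvSumSOI, List.map_cons, List.sum_cons]
      rw [Prod.mk.injEq, Prod.mk.injEq]
      refine ⟨rfl, by ring, by ring⟩
    · simp [pvAdvLt, h, List.takeWhile_cons, List.dropWhile_cons, pvLtB, pvSumOI, pvSumSOI]

theorem pvAdvLe_eq (l : List (Int × Int)) (tgt c t : Int) :
    pvAdvLe l tgt c t =
      (l.dropWhile (pvLeB tgt), c + pvSumOI (l.takeWhile (pvLeB tgt)),
        t + pvSumSOI (l.takeWhile (pvLeB tgt))) := by
  induction l generalizing c t with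
  | nil => simp [pvAdvLe, pvSumOI, pvSumSOI]
  | cons hd tl ih =>
    obtain ⟨s, oi⟩ := hd
    by_cases h : s ≤ tgt
    · simp only [pvAdvLe, if_pos h, ih, List.takeWhile_cons, List.dropWhile_cons, pvLeB,
        decide_eq_true_eq, h, if_true, decide_true, pvSumOI, pvSumSOI, List.map_cons, List.sum_cons]
      rw [Prod.mk.injEq, Prod.mk.injEq]
      refine ⟨rfl, by ring, by ring⟩
    · simp [pvAdvLe, h, List.takeWhile_cons, List.dropWhile_cons, pvLeB, pvSumOI, pvSumSOI]

-- takeWhile/dropWhile refinement: if q implies p, advancing from the q-split reaches the p-split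
theorem pv_takeWhile_split {α : Type} (p q : α → Bool) (l : List α)
    (h : ∀ a, q a = true → p a = true) :
    l.takeWhile p = l.takeWhile q ++ (l.dropWhile q).takeWhile p := by
  induction l with
  | nil => simp
  | cons hd tl ih =>
    by_cases hq : q hd
    · simp [List.takeWhile_cons, List.dropWhile_cons, hq, h hd hq, ih]
    · simp [List.takeWhile_cons, List.dropWhile_cons, hq]

theorem pv_dropWhile_split {α : Type} (p q : α → Bool) (l : List α)
    (h : ∀ a, q a = true → p a = true) :
    (l.dropWhile q).dropWhile p = l.dropWhile p := by
  induction l with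
  | nil => simp
  | cons hd tl ih =>
    by_cases hq : q hd
    · simp [List.dropWhile_cons, hq, h hd hq, ih]
    · simp [List.dropWhile_cons, hq]

-- the loss value recorded by the sweep, as take-while prefix sums of the sorted lists
def pvLossSpec (ce pe : List (Int × Int)) (peC peT t : Int) : Int :=
  (t * pvSumOI (ce.takeWhile (pvLtB t)) - pvSumSOI (ce.takeWhile (pvLtB t))) +
    ((peT - pvSumSOI (pe.takeWhile (pvLeB t))) - t * (peC - pvSumOI (pe.takeWhile (pvLeB t))))

theorem pvStepB_eq (peC peT : Int)
    (st : (List (Int × Int) × Int × Int) × (List (Int × Int) × Int × Int) × PySem.Dict Int Int)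
    (tgt : Int) :
    pvStepB peC peT st tgt =
      ((st.1.1.dropWhile (pvLtB tgt),
        st.1.2.1 + pvSumOI (st.1.1.takeWhile (pvLtB tgt)),
        st.1.2.2 + pvSumSOI (st.1.1.takeWhile (pvLtB tgt))),
       (st.2.1.1.dropWhile (pvLeB tgt),
        st.2.1.2.1 + pvSumOI (st.2.1.1.takeWhile (pvLeB tgt)),
        st.2.1.2.2 + pvSumSOI (st.2.1.1.takeWhile (pvLeB tgt))),
       (st.2.2).insert tgt
         ((tgt * (st.1.2.1 + pvSumOI (st.1.1.takeWhile (pvLtB tgt)))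
             - (st.1.2.2 + pvSumSOI (st.1.1.takeWhile (pvLtB tgt)))) +
          ((peT - (st.2.1.2.2 + pvSumSOI (st.2.1.1.takeWhile (pvLeB tgt))))
             - tgt * (peC - (st.2.1.2.1 + pvSumOI (st.2.1.1.takeWhile (pvLeB tgt)))))))  := by
  unfold pvStepB
  rw [pvAdvLt_eq, pvAdvLe_eq]

theorem pvFold_getD_notmem (peC peT : Int) (ts : List Int)
    (st : (List (Int × Int) × Int × Int) × (List (Int × Int) × Int × Int) × PySem.Dict Int Int)
    (x : Int) (hx : x ∉ ts) :
    ((ts.foldl (pvStepB peC peT) st).2.2).getD x 0 = (st.2.2).getD x 0 := by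
  induction ts generalizing st with
  | nil => rfl
  | cons hd tl ih =>
    simp only [List.foldl_cons]
    rw [ih _ (fun hmem => hx (List.mem_cons_of_mem _ hmem)), pvStepB_eq]
    rw [PySem.Dict.getD_insert]
    rw [if_neg (fun he => hx (by rw [he]; exact List.mem_cons_self))]

theorem pvFold_getD (peC peT : Int) (ce pe : List (Int × Int)) :
    ∀ (ts : List Int), ts.Pairwise (· < ·) →
    ∀ (q1 q2 : Int × Int → Bool) (d : PySem.Dict Int Int),
      (∀ t ∈ ts, ∀ a, q1 a = true → pvLtB t a = true) →
      (∀ t ∈ ts, ∀ a, q2 a = true → pvLeB t a = true) →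
      ∀ x ∈ ts,
        ((ts.foldl (pvStepB peC peT)
            ((ce.dropWhile q1, pvSumOI (ce.takeWhile q1), pvSumSOI (ce.takeWhile q1)),
             (pe.dropWhile q2, pvSumOI (pe.takeWhile q2), pvSumSOI (pe.takeWhile q2)),
             d)).2.2).getD x 0 = pvLossSpec ce pe peC peT x := by
  intro ts
  induction ts with
  | nil => intro _ q1 q2 d _ _ x hx; simp at hx
  | cons hd tl ih =>
    intro hpw q1 q2 d hq1 hq2 x hx
    rcases List.pairwise_cons.mp hpw with ⟨hhd, htl⟩
    have himp1 : ∀ a, q1 a = true → pvLtB hd a = true := hq1 hd List.mem_cons_self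
    have himp2 : ∀ a, q2 a = true → pvLeB hd a = true := hq2 hd List.mem_cons_self
    have e1 : (ce.dropWhile q1).dropWhile (pvLtB hd) = ce.dropWhile (pvLtB hd) :=
      pv_dropWhile_split _ _ _ himp1
    have e4 : (pe.dropWhile q2).dropWhile (pvLeB hd) = pe.dropWhile (pvLeB hd) :=
      pv_dropWhile_split _ _ _ himp2
    have s1 := pv_takeWhile_split (pvLtB hd) q1 ce himp1
    have s2 := pv_takeWhile_split (pvLeB hd) q2 pe himp2
    have e2 : pvSumOI (ce.takeWhile q1) + pvSumOI ((ce.dropWhile q1).takeWhile (pvLtB hd))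
        = pvSumOI (ce.takeWhile (pvLtB hd)) := by
      rw [s1]; simp [pvSumOI]
    have e3 : pvSumSOI (ce.takeWhile q1) + pvSumSOI ((ce.dropWhile q1).takeWhile (pvLtB hd))
        = pvSumSOI (ce.takeWhile (pvLtB hd)) := by
      rw [s1]; simp [pvSumSOI]
    have e5 : pvSumOI (pe.takeWhile q2) + pvSumOI ((pe.dropWhile q2).takeWhile (pvLeB hd))
        = pvSumOI (pe.takeWhile (pvLeB hd)) := by
      rw [s2]; simp [pvSumOI]
    have e6 : pvSumSOI (pe.takeWhile q2) + pvSumSOI ((pe.dropWhile q2).takeWhile (pvLeB hd))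
        = pvSumSOI (pe.takeWhile (pvLeB hd)) := by
      rw [s2]; simp [pvSumSOI]
    simp only [List.foldl_cons, pvStepB_eq, e1, e2, e3, e4, e5, e6]
    rcases List.mem_cons.mp hx with rfl | hxtl
    · have hnot : x ∉ tl := fun hmem => lt_irrefl x (hhd x hmem)
      rw [pvFold_getD_notmem _ _ _ _ _ hnot, PySem.Dict.getD_insert_self]
      rfl
    · exact ih htl (pvLtB hd) (pvLeB hd)
        ((d.insert hd _))
        (fun t ht a ha => by
          simp only [pvLtB, decide_eq_true_eq] at *
          exact lt_trans ha (hhd t ht))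
        (fun t ht a ha => by
          simp only [pvLeB, decide_eq_true_eq] at *
          exact le_trans ha (le_of_lt (hhd t ht)))
        x hxtl

-- algebra: the prefix-sum formulas expand to the element-wise sums
theorem pv_sum_lt (t : Int) (l : List (Int × Int)) :
    t * pvSumOI l - pvSumSOI l = (l.map (fun p => (t - p.1) * p.2)).sum := by
  induction l with
  | nil => simp [pvSumOI, pvSumSOI]
  | cons hd tl ih =>
    simp only [pvSumOI, pvSumSOI, List.map_cons, List.sum_cons] at *
    nlinarith [ih]

theorem pv_sum_gt (t : Int) (l : List (Int × Int)) :
    pvSumSOI l - t * pvSumOI l = (l.map (fun p => (p.1 - t) * p.2)).sum := by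
  induction l with
  | nil => simp [pvSumOI, pvSumSOI]
  | cons hd tl ih =>
    simp only [pvSumOI, pvSumSOI, List.map_cons, List.sum_cons] at *
    nlinarith [ih]

-- on a list sorted by strike, the takeWhile prefix is exactly the filter
theorem pv_takeWhile_eq_filter (t : Int) (l : List (Int × Int))
    (h : l.Pairwise (fun a b => a.1 ≤ b.1)) :
    l.takeWhile (pvLtB t) = l.filter (pvLtB t) := by
  induction l with
  | nil => simp
  | cons hd tl ih =>
    rcases List.pairwise_cons.mp h with ⟨hhd, htl⟩
    by_cases hp : pvLtB t hd
    · simp [List.takeWhile_cons, List.filter_cons, hp, ih htl]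
    · simp only [pvLtB, decide_eq_true_eq] at hp
      simp only [List.takeWhile_cons, pvLtB, decide_eq_true_eq, hp, if_false, reduceIte]
      rw [List.filter_cons]
      simp only [pvLtB, decide_eq_true_eq, hp, if_false, reduceIte]
      rw [eq_comm, List.filter_eq_nil_iff]
      intro a ha
      have h2 := hhd a ha
      simp only [pvLtB, decide_eq_true_eq]
      omega

theorem pv_dropWhile_eq_filter (t : Int) (l : List (Int × Int))
    (h : l.Pairwise (fun a b => a.1 ≤ b.1)) :
    l.dropWhile (pvLeB t) = l.filter (fun p => decide (t < p.1)) := by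
  induction l with
  | nil => simp
  | cons hd tl ih =>
    rcases List.pairwise_cons.mp h with ⟨hhd, htl⟩
    by_cases hp : pvLeB t hd
    · simp only [pvLeB, decide_eq_true_eq] at hp
      simp [List.dropWhile_cons, pvLeB, hp, ih htl, show ¬ t < hd.1 by omega]
    · simp only [pvLeB, decide_eq_true_eq] at hp
      simp only [List.dropWhile_cons, pvLeB, List.filter_cons]
      have h1 : ¬ (hd.1 ≤ t) := hp
      simp [h1, show t < hd.1 by omega]
      symm
      rw [List.filter_eq_self]
      intro a ha
      have := hhd a ha
      simp only [decide_eq_true_eq]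
      omega

theorem pvSumOI_split (l : List (Int × Int)) (q : Int × Int → Bool) :
    pvSumOI l = pvSumOI (l.takeWhile q) + pvSumOI (l.dropWhile q) := by
  unfold pvSumOI
  conv_lhs => rw [← List.takeWhile_append_dropWhile (p := q) (l := l)]
  simp only [List.map_append, List.sum_append]

theorem pvSumSOI_split (l : List (Int × Int)) (q : Int × Int → Bool) :
    pvSumSOI l = pvSumSOI (l.takeWhile q) + pvSumSOI (l.dropWhile q) := by
  unfold pvSumSOI
  conv_lhs => rw [← List.takeWhile_append_dropWhile (p := q) (l := l)]
  simp only [List.map_append, List.sum_append]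

-- A's per-target loss equals the sweep's recorded loss
theorem pvLoss_eq (ce_oi pe_oi : List (Int × Int)) (t : Int) :
    pvLossSpec (PySem.List.sorted ce_oi (fun kv => kv.1) false)
      (PySem.List.sorted pe_oi (fun kv => kv.1) false)
      (pvSumOI (PySem.List.sorted pe_oi (fun kv => kv.1) false))
      (pvSumSOI (PySem.List.sorted pe_oi (fun kv => kv.1) false)) t
      = pvLossA t ce_oi pe_oi := by
  have hpairCE : (PySem.List.sorted ce_oi (fun kv => kv.1) false).Pairwise
      (fun a b => a.1 ≤ b.1) := PySem.List.sorted_pairwise ce_oi (fun kv => kv.1)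
  have hpairPE : (PySem.List.sorted pe_oi (fun kv => kv.1) false).Pairwise
      (fun a b => a.1 ≤ b.1) := PySem.List.sorted_pairwise pe_oi (fun kv => kv.1)
  have hpermCE := PySem.List.sorted_perm ce_oi (fun kv => kv.1) false
  have hpermPE := PySem.List.sorted_perm pe_oi (fun kv => kv.1) false
  unfold pvLossSpec pvLossA
  rw [PySem.List.foldl_ite_eq_foldl_filter (p := fun p : Int × Int => t > p.1),
      PySem.List.foldl_add (g := fun p : Int × Int => (t - p.1) * p.2),
      PySem.List.foldl_ite_eq_foldl_filter (p := fun p : Int × Int => t < p.1),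
      PySem.List.foldl_add (g := fun p : Int × Int => (p.1 - t) * p.2)]
  rw [pvSumOI_split (PySem.List.sorted pe_oi (fun kv => kv.1) false) (pvLeB t),
      pvSumSOI_split (PySem.List.sorted pe_oi (fun kv => kv.1) false) (pvLeB t)]
  rw [show ∀ a b c d e f : Int, (t * a - b) + ((c + d - c) - t * (e + f - e)) = (t * a - b) + (d - t * f) from fun _ _ _ _ _ _ => by ring]
  rw [pv_sum_lt, pv_sum_gt, pv_takeWhile_eq_filter t _ hpairCE, pv_dropWhile_eq_filter t _ hpairPE]
  rw [List.Perm.sum_eq ((hpermCE.filter (pvLtB t)).map (fun p : Int × Int => (t - p.1) * p.2)),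
      List.Perm.sum_eq ((hpermPE.filter (fun p : Int × Int => decide (t < p.1))).map
        (fun p : Int × Int => (p.1 - t) * p.2))]
  unfold pvLtB
  simp only [gt_iff_lt, zero_add]

-- the two argmin folds agree once the losses agree
theorem pvArgmin_eq (rest : List Int) (f : Int → Int) (m p : Int) :
    rest.foldl (fun st target =>
        let loss := f target
        match st.1 with
        | none => (some loss, target)
        | some mm => if loss < mm then (some loss, target) else st)
      ((some m : Option Int), p)
    = (fun q : Int × Int => ((some q.1 : Option Int), q.2))
        (rest.foldl (fun st s => if f s < st.1 then (f s, s) else st) (m, p)) := by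
  induction rest generalizing m p with
  | nil => rfl
  | cons hd tl ih =>
    simp only [List.foldl_cons]
    by_cases h : f hd < m
    · simp only [h, ite_true]
      exact ih (f hd) hd
    · simp only [if_neg h]
      exact ih m p

theorem pvArgmin_full (l : List Int) (f : Int → Int) (s0 : Int) :
    ((s0 :: l).foldl (fun st target =>
        let loss := f target
        match st.1 with
        | none => (some loss, target)
        | some mm => if loss < mm then (some loss, target) else st)
      ((none : Option Int), s0)).2
    = ((s0 :: l).foldl (fun st s => if f s < st.1 then (f s, s) else st) (f s0, s0)).2 := by
  simp only [List.foldl_cons]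
  rw [if_neg (lt_irrefl _)]
  rw [pvArgmin_eq]

theorem pv_dropWhile_false {α : Type} (l : List α) : l.dropWhile (fun _ => false) = l := by
  cases l <;> simp [List.dropWhile_cons]

theorem pv_takeWhile_false {α : Type} (l : List α) : l.takeWhile (fun _ => false) = [] := by
  cases l <;> simp [List.takeWhile_cons]

-- ===== VERDICT (by name: the statement is the Claim_ definition above) =====
theorem compute_max_pain_py_spec : Claim_equal_compute_max_pain_py := by
  intro strikes ce_oi pe_oi _
  unfold Spec_compute_max_pain_py
  cases strikes with
  | nil => rfl
  | cons s0 rest =>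
    simp only [compute_max_pain_py, compute_max_pain_py_alt]
    have hpair : (PySem.List.sorted (PySem.Set.ofList (s0 :: rest)) (fun x => x) false).Pairwise
        (· < ·) := PySem.List.sorted_ofList_pairwise_lt (s0 :: rest)
    have H : ∀ s ∈ (s0 :: rest),
        ((PySem.List.sorted (PySem.Set.ofList (s0 :: rest)) (fun x => x) false).foldl
          (pvStepB ((PySem.List.sorted pe_oi (fun kv => kv.1) false).map (fun p => p.2)).sum
                   ((PySem.List.sorted pe_oi (fun kv => kv.1) false).map (fun p => p.1 * p.2)).sum)
          ((PySem.List.sorted ce_oi (fun kv => kv.1) false, 0, 0),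
           (PySem.List.sorted pe_oi (fun kv => kv.1) false, 0, 0),
           (PySem.Dict.empty : PySem.Dict Int Int))).2.2.getD s 0
        = pvLossA s ce_oi pe_oi := by
      intro s hs
      have hmem : s ∈ PySem.List.sorted (PySem.Set.ofList (s0 :: rest)) (fun x => x) false := by
        rw [PySem.List.mem_sorted, PySem.Set.mem_ofList]
        exact hs
      have hfd := pvFold_getD
        ((PySem.List.sorted pe_oi (fun kv => kv.1) false).map (fun p => p.2)).sum
        ((PySem.List.sorted pe_oi (fun kv => kv.1) false).map (fun p => p.1 * p.2)).sum
        (PySem.List.sorted ce_oi (fun kv => kv.1) false)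
        (PySem.List.sorted pe_oi (fun kv => kv.1) false)
        (PySem.List.sorted (PySem.Set.ofList (s0 :: rest)) (fun x => x) false) hpair
        (fun _ => false) (fun _ => false) PySem.Dict.empty
        (fun _ _ _ hf => by simp at hf) (fun _ _ _ hf => by simp at hf) s hmem
      rw [pv_dropWhile_false, pv_takeWhile_false, pv_dropWhile_false, pv_takeWhile_false] at hfd
      have hle := pvLoss_eq ce_oi pe_oi s
      simp only [pvSumOI, pvSumSOI, List.map_nil, List.sum_nil] at hfd hle
      rw [hfd, hle]
    have hmain : ∀ (L : PySem.Dict Int Int),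
        (∀ s ∈ (s0 :: rest), L.getD s 0 = pvLossA s ce_oi pe_oi) →
        (List.foldl (fun st target =>
            match st.1 with
            | none => (some (pvLossA target ce_oi pe_oi), target)
            | some m => if pvLossA target ce_oi pe_oi < m then
                (some (pvLossA target ce_oi pe_oi), target) else st)
          ((none : Option Int), s0) (s0 :: rest)).2
        = (List.foldl (fun st s => if L.getD s 0 < st.1 then (L.getD s 0, s) else st)
            (L.getD s0 0, s0) (s0 :: rest)).2 := by
      intro L hL
      have hcongr : List.foldl
            (fun (st : Int × Int) s => if L.getD s 0 < st.1 then (L.getD s 0, s) else st)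
            (L.getD s0 0, s0) (s0 :: rest)
          = List.foldl
            (fun (st : Int × Int) s =>
              if pvLossA s ce_oi pe_oi < st.1 then (pvLossA s ce_oi pe_oi, s) else st)
            (L.getD s0 0, s0) (s0 :: rest) :=
        PySem.List.foldl_congr_mem _ _ _ _ (fun acc x hx => by rw [hL x hx])
      rw [hcongr, hL s0 List.mem_cons_self]
      exact pvArgmin_full rest (fun t => pvLossA t ce_oi pe_oi) s0
    exact hmain _ H
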